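-- pv_equiv track=rewrite | github.com/piggybox/hackerrank | hash/sherlock_and_anagrams.py | isAnagrams
-- ===== SOURCE A (Python) =====
-- def isAnagrams(s1, s2):
--     # convert s2 to hash for fast lookup
--     hash = {}
--     for c in s2:
--         if c in hash:
--             hash[c] += 1
--         else:
--             hash[c] = 1
--
--     # check s1 against hash
--     for c in s1:
--         if c in hash and hash[c] > 0:
--             hash[c] -= 1
--         elif c in hash and hash[c] == 0:
--             return False
--         else:
--             return False
--
--     return True
-- ===== SOURCE B (Python) =====
-- def isAnagrams(s1, s2):
--     # True iff every character of s1 occurs in s2 at least as often as in s1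
--     # (same multiset-subset semantics as the original).
--     cs1 = list(s1)
--     cs2 = list(s2)
--     return all(cs1.count(c) <= cs2.count(c) for c in set(cs1))
-- ===== Notes on version B (the rewrite author's own statement) =====
-- stated objective: idiomatic
-- what changed: Replaces the build-a-mutable-hash-then-decrement-with-early-return scan by a direct declarative check: for each distinct character of s1, compare its count in s1 with its count in s2 (preserving A's multiset-subset semantics, no length check added).
import Mathlib
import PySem

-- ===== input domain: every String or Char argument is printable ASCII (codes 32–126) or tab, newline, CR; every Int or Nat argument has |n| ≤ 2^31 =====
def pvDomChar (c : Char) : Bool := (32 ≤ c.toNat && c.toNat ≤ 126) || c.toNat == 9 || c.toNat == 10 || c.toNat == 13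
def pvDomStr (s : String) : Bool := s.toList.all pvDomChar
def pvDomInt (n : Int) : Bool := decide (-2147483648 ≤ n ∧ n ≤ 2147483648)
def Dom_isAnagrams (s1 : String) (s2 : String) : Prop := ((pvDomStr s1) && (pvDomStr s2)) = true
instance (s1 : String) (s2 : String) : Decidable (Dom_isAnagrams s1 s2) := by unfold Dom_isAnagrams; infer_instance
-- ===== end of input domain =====

-- B replaces A's mutable hash-build-then-decrement scan with a per-distinct-character
-- count comparison (same multiset-subset semantics as A); objective: idiomatic.

-- ===== PORT A =====
-- 'for c in s2: if c in hash: hash[c] += 1 else: hash[c] = 1'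
def isAnagramsBuild (s2 : List Char) : PySem.Dict Char Int :=
  s2.foldl (fun h c =>
    if h.contains c then h.insert c (h.getD c 0 + 1) else h.insert c 1) PySem.Dict.empty

-- 'for c in s1: if c in hash and hash[c] > 0: hash[c] -= 1
--              elif c in hash and hash[c] == 0: return False
--              else: return False'
def isAnagramsLoop (h : PySem.Dict Char Int) : List Char → Bool
  | [] => true
  | c :: rest =>
    if h.contains c && decide (h.getD c 0 > 0) then
      isAnagramsLoop (h.insert c (h.getD c 0 - 1)) rest
    else if h.contains c && decide (h.getD c 0 = 0) then
      false
    else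
      false

def isAnagrams (s1 : String) (s2 : String) : Bool :=
  isAnagramsLoop (isAnagramsBuild s2.toList) s1.toList

-- ===== PORT B =====
-- 'cs1 = list(s1); cs2 = list(s2); return all(cs1.count(c) <= cs2.count(c) for c in set(cs1))'
def isAnagrams_alt (s1 : String) (s2 : String) : Bool :=
  let cs1 := s1.toList
  let cs2 := s2.toList
  (PySem.Set.ofList cs1).all (fun c => cs1.count c ≤ cs2.count c)

-- ===== PRECONDITION & SPEC =====
def Spec_isAnagrams (s1 : String) (s2 : String) (out : Bool) : Prop := out = isAnagrams_alt s1 s2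
instance (s1 : String) (s2 : String) (out : Bool) : Decidable (Spec_isAnagrams s1 s2 out) := by unfold Spec_isAnagrams; infer_instance

-- ===== CLAIM (what is proved, stated in full; the proofs are below) =====
def Claim_equal_isAnagrams : Prop := ∀ (s1 : String) (s2 : String), Dom_isAnagrams s1 s2 → Spec_isAnagrams s1 s2 (isAnagrams s1 s2)

-- ===== LEMMAS AND PROOFS =====

-- A's hash maps each character to its count in s2.
theorem isAnagramsBuild_getD_gen (s2 : List Char) (d : PySem.Dict Char Int) (c : Char) :
    (s2.foldl (fun h c =>
      if h.contains c then h.insert c (h.getD c 0 + 1) else h.insert c 1) d).getD c 0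
      = d.getD c 0 + (s2.count c : Int) := by
  induction s2 generalizing d with
  | nil => simp
  | cons x xs ih =>
    have hstep : (if d.contains x then d.insert x (d.getD x 0 + 1) else d.insert x 1)
        = d.insert x (d.getD x 0 + 1) := by
      by_cases hx : d.contains x
      · simp [hx]
      · rw [if_neg (by simp [hx]), PySem.Dict.getD_of_not_contains d 0 (by simp [hx])]; norm_num
    simp only [List.foldl_cons, hstep, ih, List.count_cons, PySem.Dict.getD_insert]
    by_cases hcx : c = x
    · subst hcx; simp; ring
    · simp [hcx, Ne.symm hcx]

theorem contains_of_getD_pos (h : PySem.Dict Char Int) (c : Char) (hp : h.getD c 0 > 0) :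
    h.contains c = true := by
  by_contra hc
  rw [PySem.Dict.getD_of_not_contains h 0 (by simpa using hc)] at hp
  omega

-- Invariant of A's decrementing scan: it succeeds iff every scanned character's
-- multiplicity is within the budget the dict holds for it.
theorem isAnagramsLoop_iff (cs : List Char) (h : PySem.Dict Char Int) :
    isAnagramsLoop h cs = true ↔ ∀ c ∈ cs, (cs.count c : Int) ≤ h.getD c 0 := by
  induction cs generalizing h with
  | nil => simp [isAnagramsLoop]
  | cons c rest ih =>
    have hcond : (h.contains c && decide (h.getD c 0 > 0)) = decide (h.getD c 0 > 0) := by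
      by_cases hp : h.getD c 0 > 0
      · simp [contains_of_getD_pos h c hp, hp]
      · simp [hp]
    rw [isAnagramsLoop, hcond]
    by_cases hp : h.getD c 0 > 0
    · rw [if_pos (by simp [hp]), ih]
      constructor
      · intro hr d hd
        rcases List.mem_cons.mp hd with rfl | hdr
        · by_cases hdin : d ∈ rest
          · have := hr d hdin
            rw [PySem.Dict.getD_insert] at this
            simp at this
            simp [List.count_cons]
            omega
          · simp [List.count_eq_zero_of_not_mem hdin]
            omega
        · by_cases hdc : d = c
          · subst hdc
            have := hr d hdr
            rw [PySem.Dict.getD_insert] at this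
            simp at this
            simp [List.count_cons]
            omega
          · have := hr d hdr
            rw [PySem.Dict.getD_insert, if_neg hdc] at this
            simp [List.count_cons, beq_iff_eq, Ne.symm hdc]
            omega
      · intro hr d hd
        rw [PySem.Dict.getD_insert]
        by_cases hdc : d = c
        · subst hdc
          have := hr d (List.mem_cons_self ..)
          simp [List.count_cons] at this
          simp
          omega
        · have := hr d (List.mem_cons_of_mem _ hd)
          simp [List.count_cons] at this
          simp [hdc]
          omega
    · rw [if_neg (by simp [hp])]
      constructor
      · intro hf; cases (by split at hf <;> simp_all : False)
      · intro hr
        have := hr c (List.mem_cons_self ..)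
        simp at this
        omega

-- ===== VERDICT (by name: the statement is the Claim_ definition above) =====
theorem isAnagrams_spec : Claim_equal_isAnagrams := by
  intro s1 s2 _
  unfold Spec_isAnagrams isAnagrams isAnagrams_alt
  rw [Bool.eq_iff_iff, isAnagramsLoop_iff]
  simp only [List.all_eq_true, PySem.Set.mem_ofList, decide_eq_true_eq, isAnagramsBuild,
    isAnagramsBuild_getD_gen, PySem.Dict.getD_empty]
  constructor
  · intro hh c hc; exact_mod_cast (by simpa using hh c hc)
  · intro hh c hc; have := hh c hc; simp; exact_mod_cast this
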